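-- pv_equiv track=rewrite | github.com/Kawser-nerd/CLCDSA | Source Codes/AtCoder/abc020/D/3544697.py | calc
-- ===== SOURCE A (Python) =====
-- MOD = 10 ** 9 + 7
--
-- def prime(M):
--     rec = []
--     i = 2
--     while i * i <= M:
--         if M % i == 0:
--             rec.append(i)
--             while M % i == 0:
--                 M //= i
--         i += 1
--     if M > 1:
--         rec.append(M)
--
--     return rec
--
-- def calc(N, K):
--     div = prime(K)
--     Q = len(div)
--     res = 0
--     for i in range(1 << Q):
--         mul = 1
--         k = 0
--         for j in range(Q):
--             if i & 1 << j:
--                 mul *= div[j]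
--                 k += 1
--
--         d = N // mul
--         tmp = d * (d + 1) // 2 * mul
--         tmp %= MOD
--         if k % 2 != 0:
--             res -= tmp + MOD
--             res %= MOD
--         else:
--             res += tmp
--             res %= MOD
--
--     return res
-- ===== SOURCE B (Python) =====
-- MOD = 10 ** 9 + 7
--
-- def _strip(m, p):
--     # divide out every copy of p from m
--     if m % p:
--         return m
--     return _strip(m // p, p)
--
-- def _dprimes(m, p):
--     # distinct prime factors of m that are >= p, assuming m has none below p:
--     # scan trial divisors upward; when one divides, strip it and recurse
--     while p * p <= m:
--         if m % p == 0:
--             return [p] + _dprimes(_strip(m, p), p + 1)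
--         p += 1
--     return [m] if m > 1 else []
--
-- def calc(N, K):
--     # inclusion-exclusion table: (divisor, sign) pairs grown one prime at a time
--     terms = [(1, 1)]
--     for p in _dprimes(K, 2):
--         terms = terms + [(m * p, -s) for (m, s) in terms]
--     res = 0
--     for m, s in terms:
--         d = N // m
--         res = (res + s * (d * (d + 1) // 2 * m % MOD)) % MOD
--     return res
-- ===== Notes on version B (the rewrite author's own statement) =====
-- stated objective: alternative
-- what changed: A enumerates the 2^Q subsets of K's prime factors with a bitmask outer loop and an inner bit-testing loop recomputing each divisor and its popcount; B factors K by recursion and grows an explicit (divisor, sign) table one prime at a time (each prime doubles the table, negating signs), then sums the inclusion-exclusion terms in one flat pass over the table.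
import Mathlib
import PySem

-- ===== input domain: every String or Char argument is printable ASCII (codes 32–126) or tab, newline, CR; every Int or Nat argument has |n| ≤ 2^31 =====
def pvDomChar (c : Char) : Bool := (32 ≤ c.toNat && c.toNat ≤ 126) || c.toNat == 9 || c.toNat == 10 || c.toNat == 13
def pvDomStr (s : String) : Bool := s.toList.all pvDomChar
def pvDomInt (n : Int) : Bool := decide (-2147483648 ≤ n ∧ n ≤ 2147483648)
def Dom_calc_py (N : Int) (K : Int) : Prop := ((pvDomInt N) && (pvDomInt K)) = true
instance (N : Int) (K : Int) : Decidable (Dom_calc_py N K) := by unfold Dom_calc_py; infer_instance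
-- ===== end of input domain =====

-- B replaces A's bitmask double loop over subsets by an explicit (divisor, sign) table
-- grown one prime at a time and summed in one flat pass, and factors K by recursion
-- instead of nested while loops; objective: alternative (same cost, different structure).

-- ===== PORT A =====
def pvMOD : Int := 10 ^ 9 + 7

-- termination measure lemmas cited by the ports' decreasing_by (proof helpers only)
theorem pv_strip_dec (M i : Int) (h0 : 0 < M) (h2 : 2 ≤ i) :
    (PySem.Int.floordiv M i).toNat < M.toNat := by
  have h1 : PySem.Int.floordiv M i < M :=
    (PySem.Int.floordiv_lt_iff_lt_mul (by omega)).mpr ((lt_mul_iff_one_lt_right h0).mpr (by omega))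
  have h2 : (0:Int) ≤ PySem.Int.floordiv M i :=
    (PySem.Int.le_floordiv_iff_mul_le (by omega)).mpr (by omega)
  omega

theorem pv_sq_le (i M : Int) (hle : i * i ≤ M) : i ≤ M := by
  have hi : i ≤ i * i := by
    rcases le_or_gt i 0 with h0 | h0
    · exact h0.trans (mul_self_nonneg i)
    · exact le_mul_of_one_le_left (by omega) (by omega)
  omega

theorem pv_outer_dec (M M' i : Int) (hle : i * i ≤ M) (hM' : M' ≤ M) :
    (M' + 1 - (i + 1)).toNat < (M + 1 - i).toNat := by
  have := pv_sq_le i M hle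
  omega

-- inner `while M % i == 0: M //= i` of A's factor loop; the `0 < M ∧ 2 ≤ i` conjuncts
-- only ensure termination and hold at every call site (reached only with 2 ≤ i ∧ i*i ≤ M).
def stripFac (M i : Int) : Int :=
  if h : PySem.Int.mod M i = 0 ∧ 0 < M ∧ 2 ≤ i then
    stripFac (PySem.Int.floordiv M i) i
  else M
termination_by M.toNat
decreasing_by exact pv_strip_dec M i h.2.1 h.2.2

theorem stripFac_le (M i : Int) : stripFac M i ≤ M := by
  fun_induction stripFac M i with
  | case1 M h ih =>
    have h1 : PySem.Int.floordiv M i < M :=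
      (PySem.Int.floordiv_lt_iff_lt_mul (by omega)).mpr ((lt_mul_iff_one_lt_right h.2.1).mpr (by omega))
    omega
  | case2 M h => exact le_refl M

-- the outer `while i * i <= M:` loop of A's `prime`
def primeAux (M i : Int) (rec : List Int) : List Int :=
  if hle : i * i ≤ M then
    if PySem.Int.mod M i = 0 then
      primeAux (stripFac M i) (i + 1) (rec ++ [i])
    else
      primeAux M (i + 1) rec
  else if 1 < M then rec ++ [M] else rec
termination_by (M + 1 - i).toNat
decreasing_by
  · exact pv_outer_dec M (stripFac M i) i hle (stripFac_le M i)
  · exact pv_outer_dec M M i hle (le_refl M)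

def primeList (M : Int) : List Int := primeAux M 2 []

-- body of A's inner `for j in range(Q):` loop, state (mul, k)
def innerStep (i : Int) (div : List Int) (mk : Int × Int) (j : Int) : Int × Int :=
  if PySem.Int.band i ((1 : Int) <<< j.toNat) ≠ 0 then
    (mk.1 * PySem.List.pyGetD div j 0, mk.2 + 1)
  else mk

-- body of A's outer `for i in range(1 << Q):` loop
def outerStep (N : Int) (div : List Int) (res i : Int) : Int :=
  let mk := (PySem.List.pyRange 0 (div.length : Int) 1).foldl (innerStep i div) (1, 0)
  let d := PySem.Int.floordiv N mk.1
  let tmp := PySem.Int.mod (PySem.Int.floordiv (d * (d + 1)) 2 * mk.1) pvMOD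
  if PySem.Int.mod mk.2 2 ≠ 0 then PySem.Int.mod (res - (tmp + pvMOD)) pvMOD
  else PySem.Int.mod (res + tmp) pvMOD

def calc_py (N : Int) (K : Int) : Int :=
  let div := primeList K
  (PySem.List.pyRange 0 ((1 : Int) <<< div.length) 1).foldl (outerStep N div) 0

-- ===== PORT B =====
-- Source B's `_strip`: recursive removal of every copy of p; the second guard is for
-- termination only (every call site has 0 < m ∧ 2 ≤ p).
def stripB (m p : Int) : Int :=
  if PySem.Int.mod m p ≠ 0 then m
  else if h : 0 < m ∧ 2 ≤ p then stripB (PySem.Int.floordiv m p) p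
  else m
termination_by m.toNat
decreasing_by exact pv_strip_dec m p h.1 h.2

theorem stripB_le (m p : Int) : stripB m p ≤ m := by
  fun_induction stripB m p with
  | case1 m h => exact le_refl m
  | case2 m h1 h ih =>
    have hlt : PySem.Int.floordiv m p < m :=
      (PySem.Int.floordiv_lt_iff_lt_mul (by omega)).mpr ((lt_mul_iff_one_lt_right h.1).mpr (by omega))
    omega
  | case3 m h1 h => exact le_refl m

-- Source B's `_dprimes`: scan trial divisors p upward (the while loop); when one divides,
-- strip it and recurse on the stripped value
def dprimes (m p : Int) : List Int :=
  if hle : p * p ≤ m then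
    if PySem.Int.mod m p = 0 then p :: dprimes (stripB m p) (p + 1)
    else dprimes m (p + 1)
  else if 1 < m then [m] else []
termination_by (m + 1 - p).toNat
decreasing_by
  · exact pv_outer_dec m (stripB m p) p hle (stripB_le m p)
  · exact pv_outer_dec m m p hle (le_refl m)

-- body of Source B's `for p in _dprimes(K, 2):` table-doubling loop
def termStep (ts : List (Int × Int)) (p : Int) : List (Int × Int) :=
  ts ++ ts.map (fun ms => (ms.1 * p, -ms.2))

-- body of Source B's final `for m, s in terms:` summation loop
def sumStep (N : Int) (res : Int) (ms : Int × Int) : Int :=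
  let d := PySem.Int.floordiv N ms.1
  PySem.Int.mod (res + ms.2 * PySem.Int.mod (PySem.Int.floordiv (d * (d + 1)) 2 * ms.1) pvMOD) pvMOD

def calc_py_alt (N : Int) (K : Int) : Int :=
  let terms := (dprimes K 2).foldl termStep [(1, 1)]
  terms.foldl (sumStep N) 0

-- ===== PRECONDITION & SPEC =====
def Spec_calc_py (N : Int) (K : Int) (out : Int) : Prop := out = calc_py_alt N K
instance (N : Int) (K : Int) (out : Int) : Decidable (Spec_calc_py N K out) := by unfold Spec_calc_py; infer_instance

-- ===== CLAIM (what is proved, stated in full; the proofs are below) =====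
def Claim_equal_calc_py : Prop := ∀ (N : Int) (K : Int), Dom_calc_py N K → Spec_calc_py N K (calc_py N K)

-- ===== LEMMAS AND PROOFS =====

theorem pvMOD_pos : (0:Int) < pvMOD := by norm_num [pvMOD]

theorem shl_one (s : Nat) : ((1 : Int) <<< s) = ((2 ^ s : Nat) : Int) := by
  rw [Int.shiftLeft_eq]; push_cast; ring

theorem mod_shift_add (a b : Int) :
    PySem.Int.mod (PySem.Int.mod a pvMOD + b) pvMOD = PySem.Int.mod (a + b) pvMOD := by
  simp only [PySem.Int.mod_eq_emod_of_pos pvMOD_pos]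
  exact Int.emod_add_emod a pvMOD b

theorem mod_shift_sub (a b : Int) :
    PySem.Int.mod (PySem.Int.mod a pvMOD - (b + pvMOD)) pvMOD = PySem.Int.mod (a - b) pvMOD := by
  simp only [PySem.Int.mod_eq_emod_of_pos pvMOD_pos]
  rw [sub_add_eq_sub_sub, Int.sub_emod_right]
  rw [Int.sub_emod, Int.emod_emod_of_dvd a dvd_rfl, ← Int.sub_emod]

-- the two ports factor K identically
theorem stripB_eq_stripFac (M i : Int) : stripB M i = stripFac M i := by
  fun_induction stripFac M i with
  | case1 M h ih =>
    rw [stripB]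
    rw [if_neg (by simp [h.1]), dif_pos h.2]
    exact ih
  | case2 M h =>
    rw [stripB]
    by_cases hm : PySem.Int.mod M i = 0
    · rw [if_neg (by simp [hm]), dif_neg (fun hc => h ⟨hm, hc⟩)]
    · rw [if_pos hm]

theorem primeAux_eq_dprimes (M i : Int) (rec : List Int) :
    primeAux M i rec = rec ++ dprimes M i := by
  fun_induction primeAux M i rec with
  | case1 M i rec hle hmod ih =>
    rw [ih]
    conv_rhs => rw [dprimes]
    rw [dif_pos hle, if_pos hmod, stripB_eq_stripFac]
    simp
  | case2 M i rec hle hmod ih =>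
    rw [ih]
    conv_rhs => rw [dprimes]
    rw [dif_pos hle, if_neg hmod]
  | case3 M i rec hle hM =>
    conv_rhs => rw [dprimes]
    rw [dif_neg hle, if_pos hM]
  | case4 M i rec hle hM =>
    conv_rhs => rw [dprimes]
    rw [dif_neg hle, if_neg hM]
    simp

-- product of div[j] over the set bits j of i, and the number of those bits
def subMul : List Int → Nat → Int
  | [], _ => 1
  | p :: ps, i => (if i % 2 = 1 then p else 1) * subMul ps (i / 2)

def subK : List Int → Nat → Nat
  | [], _ => 0
  | _ :: ps, i => (if i % 2 = 1 then 1 else 0) + subK ps (i / 2)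

def sg (div : List Int) (i : Nat) : Int := if subK div i % 2 = 1 then -1 else 1

-- the i-th inclusion-exclusion term after the mod reduction
def tmpv (N : Int) (div : List Int) (i : Nat) : Int :=
  PySem.Int.mod
    (PySem.Int.floordiv
      (PySem.Int.floordiv N (subMul div i) * (PySem.Int.floordiv N (subMul div i) + 1)) 2
      * subMul div i) pvMOD

-- A's inner loop computes (subMul div i, subK div i)
theorem inner_fold (iN : Nat) (div : List Int) :
    ∀ (s : Nat) (m0 k0 : Int),
      List.foldl
        (fun (mk : Int × Int) (jp : Int × Int) =>
          if PySem.Int.band (iN : Int) ((1 : Int) <<< jp.1.toNat) ≠ 0 then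
            (mk.1 * jp.2, mk.2 + 1)
          else mk)
        (m0, k0) (PySem.List.enumerate div (s : Int))
      = (m0 * subMul div (iN / 2 ^ s), k0 + (subK div (iN / 2 ^ s) : Int)) := by
  induction div with
  | nil => intro s m0 k0; simp [PySem.List.enumerate, subMul, subK]
  | cons p ps ih =>
    intro s m0 k0
    rw [PySem.List.enumerate_cons]
    have hcast : ((s : Int) + 1) = (((s + 1 : Nat)) : Int) := by push_cast; ring
    have hcond : (PySem.Int.band (iN : Int) ((1 : Int) <<< ((s : Int)).toNat) ≠ 0)
        ↔ (iN / 2 ^ s % 2 = 1) := by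
      rw [show ((s : Int)).toNat = s by simp, shl_one, PySem.Int.band_natCast]
      rw [Nat.and_two_pow]
      constructor
      · intro h
        have : iN.testBit s = true := by
          by_contra hb
          simp [Bool.not_eq_true] at hb
          simp [hb] at h
        rwa [Nat.testBit_eq_decide_div_mod_eq, decide_eq_true_eq] at this
      · intro h
        have : iN.testBit s = true := by
          rw [Nat.testBit_eq_decide_div_mod_eq, decide_eq_true_eq]; exact h
        simp [this]
    have hdiv : iN / 2 ^ s / 2 = iN / 2 ^ (s + 1) := by
      rw [Nat.div_div_eq_div_mul, pow_succ]
    simp only [List.foldl_cons]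
    by_cases hc : iN / 2 ^ s % 2 = 1
    · rw [if_pos (hcond.mpr hc)]
      rw [hcast, ih (s+1) (m0 * p) (k0 + 1)]
      simp only [subMul, subK, hdiv, if_pos hc, Prod.mk.injEq]
      exact ⟨by ring, by push_cast; ring⟩
    · rw [if_neg (fun h => hc (hcond.mp h))]
      rw [hcast, ih (s+1) m0 k0]
      simp only [subMul, subK, hdiv, if_neg hc, Prod.mk.injEq]
      exact ⟨by ring, by push_cast; ring⟩

theorem inner_loop_eq (iN : Nat) (div : List Int) :
    (PySem.List.pyRange 0 (div.length : Int) 1).foldl (innerStep (iN : Int) div) (1, 0)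
      = (subMul div iN, (subK div iN : Int)) := by
  have h1 : (div.length : Int) = PySem.List.len div := by simp
  rw [h1]
  have h2 : (PySem.List.pyRange 0 (PySem.List.len div) 1).foldl (innerStep (iN : Int) div) (1, 0)
      = List.foldl
        (fun (mk : Int × Int) (jp : Int × Int) =>
          if PySem.Int.band (iN : Int) ((1 : Int) <<< jp.1.toNat) ≠ 0 then
            (mk.1 * jp.2, mk.2 + 1)
          else mk)
        (1, 0) (PySem.List.enumerate div 0) := by
    rw [PySem.List.enumerate_eq_map_pyRange div 0, List.foldl_map]
    rfl
  have h3 := inner_fold iN div 0 1 0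
  simp only [Nat.cast_zero, pow_zero, Nat.div_one, one_mul, zero_add] at h3
  rw [h2, h3]

-- folding A's outer body from a reduced accumulator = mod of the signed tmpv-sum
theorem outer_fold (N : Int) (div : List Int) (n : Nat) (x : Int) :
    List.foldl (outerStep N div) (PySem.Int.mod x pvMOD)
        ((List.range n).map Int.ofNat)
      = PySem.Int.mod (x + ∑ i ∈ Finset.range n, sg div i * tmpv N div i) pvMOD := by
  induction n generalizing x with
  | zero => simp
  | succ n ih =>
    rw [List.range_succ, List.map_append, List.foldl_append, ih, Finset.sum_range_succ]
    show outerStep N div _ _ = _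
    unfold outerStep
    simp only [Int.ofNat_eq_natCast]
    rw [inner_loop_eq n div]
    simp only []
    have hpar : PySem.Int.mod ((subK div n : Int)) 2 = ((subK div n % 2 : Nat) : Int) := by
      exact_mod_cast PySem.Int.mod_natCast (subK div n) 2
    by_cases hc : subK div n % 2 = 1
    · rw [if_pos (show PySem.Int.mod ((subK div n : Int)) 2 ≠ 0 by rw [hpar]; norm_cast; omega)]
      rw [mod_shift_sub]
      unfold sg tmpv
      rw [if_pos hc]
      congr 1
      ring
    · rw [if_neg (show ¬PySem.Int.mod ((subK div n : Int)) 2 ≠ 0 by rw [hpar]; push Not; norm_cast; omega)]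
      rw [mod_shift_add]
      unfold sg tmpv
      rw [if_neg hc]
      congr 1
      ring

-- bit-indexing lemmas for the appended prime (new highest bit)
theorem subMul_append_lt (l : List Int) (p : Int) (i : Nat) (h : i < 2 ^ l.length) :
    subMul (l ++ [p]) i = subMul l i := by
  induction l generalizing i with
  | nil =>
    simp only [List.length_nil, pow_zero, Nat.lt_one_iff] at h
    subst h
    norm_num [subMul]
  | cons q l ih =>
    have hlt : i / 2 < 2 ^ l.length := by
      have h2 : 2 ^ (q :: l).length = 2 * 2 ^ l.length := by
        simp [List.length_cons, pow_succ]; ring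
      omega
    simp only [List.cons_append, subMul, ih (i / 2) hlt]

theorem subMul_append_ge (l : List Int) (p : Int) (j : Nat) (h : j < 2 ^ l.length) :
    subMul (l ++ [p]) (2 ^ l.length + j) = p * subMul l j := by
  induction l generalizing j with
  | nil =>
    simp only [List.length_nil, pow_zero, Nat.lt_one_iff] at h
    subst h
    norm_num [subMul]
  | cons q l ih =>
    have h2 : 2 ^ (q :: l).length = 2 * 2 ^ l.length := by
      simp [List.length_cons, pow_succ]; ring
    have hm : (2 ^ (q :: l).length + j) % 2 = j % 2 := by omega
    have hd : (2 ^ (q :: l).length + j) / 2 = 2 ^ l.length + j / 2 := by omega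
    have hjd : j / 2 < 2 ^ l.length := by omega
    simp only [List.cons_append, subMul, hm, hd, ih (j / 2) hjd]
    ring

theorem subK_append_lt (l : List Int) (p : Int) (i : Nat) (h : i < 2 ^ l.length) :
    subK (l ++ [p]) i = subK l i := by
  induction l generalizing i with
  | nil =>
    simp only [List.length_nil, pow_zero, Nat.lt_one_iff] at h
    subst h
    norm_num [subK]
  | cons q l ih =>
    have hlt : i / 2 < 2 ^ l.length := by
      have h2 : 2 ^ (q :: l).length = 2 * 2 ^ l.length := by
        simp [List.length_cons, pow_succ]; ring
      omega
    simp only [List.cons_append, subK, ih (i / 2) hlt]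

theorem subK_append_ge (l : List Int) (p : Int) (j : Nat) (h : j < 2 ^ l.length) :
    subK (l ++ [p]) (2 ^ l.length + j) = 1 + subK l j := by
  induction l generalizing j with
  | nil =>
    simp only [List.length_nil, pow_zero, Nat.lt_one_iff] at h
    subst h
    norm_num [subK]
  | cons q l ih =>
    have h2 : 2 ^ (q :: l).length = 2 * 2 ^ l.length := by
      simp [List.length_cons, pow_succ]; ring
    have hm : (2 ^ (q :: l).length + j) % 2 = j % 2 := by omega
    have hd : (2 ^ (q :: l).length + j) / 2 = 2 ^ l.length + j / 2 := by omega
    have hjd : j / 2 < 2 ^ l.length := by omega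
    simp only [List.cons_append, subK, hm, hd, ih (j / 2) hjd]
    ring

theorem sg_append_lt (l : List Int) (p : Int) (i : Nat) (h : i < 2 ^ l.length) :
    sg (l ++ [p]) i = sg l i := by
  unfold sg; rw [subK_append_lt l p i h]

theorem sg_append_ge (l : List Int) (p : Int) (j : Nat) (h : j < 2 ^ l.length) :
    sg (l ++ [p]) (2 ^ l.length + j) = - sg l j := by
  unfold sg
  rw [subK_append_ge l p j h]
  by_cases hc : subK l j % 2 = 1
  · rw [if_neg (by omega), if_pos hc]; norm_num
  · rw [if_pos (by omega), if_neg hc]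

-- B's table after processing l is exactly the subset table indexed by bits of i
theorem terms_eq (l : List Int) :
    l.foldl termStep [((1 : Int), (1 : Int))]
      = (List.range (2 ^ l.length)).map (fun i => (subMul l i, sg l i)) := by
  induction l using List.reverseRecOn with
  | nil => simp [subMul, sg, subK]
  | append_singleton l p ih =>
    rw [List.foldl_append, List.foldl_cons, List.foldl_nil, ih]
    show termStep _ p = _
    unfold termStep
    have hlen : 2 ^ (l ++ [p]).length = 2 ^ l.length + 2 ^ l.length := by
      simp [List.length_append, pow_succ]; ring
    rw [hlen, List.range_add, List.map_append, List.map_map]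
    congr 1
    · refine List.map_congr_left (fun i hi => ?_)
      have h := List.mem_range.mp hi
      rw [subMul_append_lt l p i h, sg_append_lt l p i h]
    · rw [List.map_map]
      refine List.map_congr_left (fun j hj => ?_)
      have h := List.mem_range.mp hj
      simp only [Function.comp_apply]
      rw [subMul_append_ge l p j h, sg_append_ge l p j h, mul_comm]

-- folding B's summation body over the subset table = mod of the signed tmpv-sum
theorem alt_fold (N : Int) (div : List Int) (n : Nat) (x : Int) :
    List.foldl (sumStep N) (PySem.Int.mod x pvMOD)
        ((List.range n).map (fun i => (subMul div i, sg div i)))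
      = PySem.Int.mod (x + ∑ i ∈ Finset.range n, sg div i * tmpv N div i) pvMOD := by
  induction n generalizing x with
  | zero => simp
  | succ n ih =>
    rw [List.range_succ, List.map_append, List.foldl_append, ih, Finset.sum_range_succ]
    show sumStep N _ _ = _
    unfold sumStep tmpv
    simp only []
    rw [mod_shift_add]
    congr 1
    ring

theorem calc_py_eq (N K : Int) : calc_py N K = calc_py_alt N K := by
  unfold calc_py calc_py_alt
  have hdiv : dprimes K 2 = primeList K := (primeAux_eq_dprimes K 2 []).symm
  rw [hdiv]
  show (PySem.List.pyRange 0 ((1 : Int) <<< (primeList K).length) 1).foldl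
        (outerStep N (primeList K)) 0
      = ((primeList K).foldl termStep [((1 : Int), (1 : Int))]).foldl (sumStep N) 0
  have h0 : (0 : Int) = PySem.Int.mod 0 pvMOD := by
    rw [PySem.Int.mod_eq_emod_of_pos pvMOD_pos, Int.zero_emod]
  have hbridge : List.map (fun k => ((k : Nat) : Int)) (List.range (2 ^ (primeList K).length))
      = List.map Int.ofNat (List.range (2 ^ (primeList K).length)) := rfl
  have hA := outer_fold N (primeList K) (2 ^ (primeList K).length) 0
  have hB := alt_fold N (primeList K) (2 ^ (primeList K).length) 0
  rw [zero_add] at hA hB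
  rw [shl_one, PySem.List.pyRange_zero_nat, hbridge, terms_eq]
  rw [h0, hA, hB]

-- ===== VERDICT (by name: the statement is the Claim_ definition above) =====
theorem calc_py_spec : Claim_equal_calc_py := by
  intro N K _
  exact calc_py_eq N K
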